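-- pv_equiv track=rewrite | github.com/ratnaprasad/EmberEye | embereye/core/vision_detector.py | _score_from_factors
-- ===== SOURCE A (Python) =====
-- SCORE_FACTORS = {
--     "flame": 40,
--     "smoke_toxic": 30,
--     "smoke_heavy": 25,
--     "smoke": 15,
--     "spark": 15,
--     "ember": 12,
--     "person_distress": 25,
--     "confined_space": 20,
--     "no_ppe": 15,
--     "weapon": 40,
--     "electrical_arc": 30,
--     "explosion": 40,
--     "gas_leak": 25,
--     "pressure_vessel": 20,
-- }
--
-- def _score_from_factors(present_classes):
--     score = 0
--     for cls, delta in SCORE_FACTORS.items():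
--         if cls in present_classes:
--             score += delta
--     # Boundaries and normalization
--     score = max(0, min(100, score))
--     # Map to textual severity for convenience
--     if score >= 81:
--         label = "CRITICAL"
--     elif score >= 61:
--         label = "HIGH"
--     elif score >= 31:
--         label = "MEDIUM"
--     elif score >= 1:
--         label = "LOW"
--     else:
--         label = "NORMAL"
--     return score, label
-- ===== SOURCE B (Python) =====
-- SCORE_FACTORS = {
--     "flame": 40,
--     "smoke_toxic": 30,
--     "smoke_heavy": 25,
--     "smoke": 15,
--     "spark": 15,
--     "ember": 12,
--     "person_distress": 25,
--     "confined_space": 20,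
--     "no_ppe": 15,
--     "weapon": 40,
--     "electrical_arc": 30,
--     "explosion": 40,
--     "gas_leak": 25,
--     "pressure_vessel": 20,
-- }
--
-- _THRESHOLDS = [1, 31, 61, 81]
-- _LABELS = ["NORMAL", "LOW", "MEDIUM", "HIGH", "CRITICAL"]
--
--
-- def _score_from_factors(present_classes):
--     # Iterate the input (deduplicated) instead of the factor table,
--     # and pick the label from a threshold table instead of an if/elif chain.
--     raw = sum(SCORE_FACTORS.get(c, 0) for c in set(present_classes))
--     score = max(0, min(100, raw))
--     label = _LABELS[sum(1 for t in _THRESHOLDS if t <= score)]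
--     return score, label
-- ===== Notes on version B (the rewrite author's own statement) =====
-- stated objective: idiomatic
-- what changed: B inverts the traversal (sums weights over the deduplicated input with dict lookups instead of scanning the whole factor table for membership) and replaces the if/elif label chain with a threshold-table lookup.
import Mathlib
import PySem

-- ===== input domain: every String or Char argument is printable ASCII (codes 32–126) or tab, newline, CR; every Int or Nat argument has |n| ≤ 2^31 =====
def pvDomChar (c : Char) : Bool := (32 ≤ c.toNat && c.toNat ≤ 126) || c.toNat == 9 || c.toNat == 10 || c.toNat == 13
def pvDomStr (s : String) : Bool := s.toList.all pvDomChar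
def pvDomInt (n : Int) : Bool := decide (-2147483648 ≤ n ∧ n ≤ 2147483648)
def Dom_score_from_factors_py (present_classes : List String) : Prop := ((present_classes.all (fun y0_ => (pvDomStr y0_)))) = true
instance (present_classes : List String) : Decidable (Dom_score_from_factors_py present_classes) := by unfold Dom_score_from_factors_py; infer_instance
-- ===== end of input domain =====

-- B changes the traversal: it sums weights over the deduplicated input (dict lookups) instead of
-- scanning the factor table for membership, and picks the label from a threshold table instead of
-- an if/elif chain (objective: idiomatic; same return value).

-- ===== PORT A =====
-- the module-level dict SCORE_FACTORS (insertion order)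
def sfDict : PySem.Dict String Int := PySem.Dict.ofList
  [("flame", 40), ("smoke_toxic", 30), ("smoke_heavy", 25), ("smoke", 15), ("spark", 15),
   ("ember", 12), ("person_distress", 25), ("confined_space", 20), ("no_ppe", 15),
   ("weapon", 40), ("electrical_arc", 30), ("explosion", 40), ("gas_leak", 25),
   ("pressure_vessel", 20)]

def score_from_factors_py (present_classes : List String) : Int × String :=
  let score : Int := sfDict.items.foldl
    (fun s cd => if cd.1 ∈ present_classes then s + cd.2 else s) 0
  let score : Int := max 0 (min 100 score)
  let label : String :=
    if score ≥ 81 then "CRITICAL"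
    else if score ≥ 61 then "HIGH"
    else if score ≥ 31 then "MEDIUM"
    else if score ≥ 1 then "LOW"
    else "NORMAL"
  (score, label)

-- ===== PORT B =====
def sfThresholds : List Int := [1, 31, 61, 81]
def sfLabels : List String := ["NORMAL", "LOW", "MEDIUM", "HIGH", "CRITICAL"]

def score_from_factors_py_alt (present_classes : List String) : Int × String :=
  let raw : Int := ((PySem.Set.ofList present_classes).map (fun c => sfDict.getD c 0)).sum
  let score : Int := max 0 (min 100 raw)
  -- _LABELS[...] : the index is always 0..4, so the list access never raises; .getD is exact here
  let label : String := sfLabels.getD (sfThresholds.countP (fun t => t ≤ score)) ""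
  (score, label)

-- ===== PRECONDITION & SPEC =====
def Spec_score_from_factors_py (present_classes : List String) (out : Int × String) : Prop := out = score_from_factors_py_alt present_classes
instance (present_classes : List String) (out : Int × String) : Decidable (Spec_score_from_factors_py present_classes out) := by unfold Spec_score_from_factors_py; infer_instance

-- ===== CLAIM (what is proved, stated in full; the proofs are below) =====
def Claim_equal_score_from_factors_py : Prop := ∀ (present_classes : List String), Dom_score_from_factors_py present_classes → Spec_score_from_factors_py present_classes (score_from_factors_py present_classes)

-- ===== LEMMAS AND PROOFS =====

-- unfolding the assoc-list lookup one entry at a time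
lemma getD_mk_cons (k : String) (w : Int) (T : List (String × Int)) (c : String) (d : Int) :
    PySem.Dict.getD (PySem.Dict.mk ((k, w) :: T)) c d
      = if k = c then w else PySem.Dict.getD (PySem.Dict.mk T) c d := by
  by_cases h : k = c <;> simp [PySem.Dict.getD, PySem.Dict.get?, h]

lemma getD_mk_absent (T : List (String × Int)) (c : String) (d : Int)
    (h : c ∉ T.map Prod.fst) : PySem.Dict.getD (PySem.Dict.mk T) c d = d := by
  induction T with
  | nil => simp [PySem.Dict.getD, PySem.Dict.get?]
  | cons p T ih =>
    simp only [List.map_cons, List.mem_cons, not_or] at h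
    rcases p with ⟨k, w⟩
    rw [getD_mk_cons, if_neg (Ne.symm h.1)]
    exact ih h.2

lemma sum_single_hit (k : String) (w : Int) (L : List String) (hnd : L.Nodup) :
    (L.map (fun c => if k = c then w else 0)).sum = if k ∈ L then w else 0 := by
  induction L with
  | nil => simp
  | cons x L ih =>
    rcases List.nodup_cons.mp hnd with ⟨hx, hL⟩
    simp only [List.map_cons, List.sum_cons, ih hL, List.mem_cons]
    by_cases h : k = x
    · subst h; simp [hx]
    · simp [h]

-- double counting: summing the table weights of present classes over the table
-- equals summing the looked-up weights over the (deduplicated) present classes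
lemma exchange_sum (T : List (String × Int)) (hT : (T.map Prod.fst).Nodup)
    (L : List String) (hL : L.Nodup) :
    (T.map (fun cd => if cd.1 ∈ L then cd.2 else 0)).sum
      = (L.map (fun c => PySem.Dict.getD (PySem.Dict.mk T) c 0)).sum := by
  induction T with
  | nil => simp [PySem.Dict.getD, PySem.Dict.get?]
  | cons p T ih =>
    rcases p with ⟨k, w⟩
    simp only [List.map_cons] at hT
    rcases List.nodup_cons.mp hT with ⟨hk, hT'⟩
    have hrw : (L.map fun c => PySem.Dict.getD (PySem.Dict.mk ((k, w) :: T)) c 0)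
        = L.map fun c => (if k = c then w else 0) + PySem.Dict.getD (PySem.Dict.mk T) c 0 := by
      refine List.map_congr_left (fun c _ => ?_)
      rw [getD_mk_cons]
      by_cases h : k = c
      · subst h; simp [getD_mk_absent T k 0 hk]
      · simp [h]
    rw [hrw, PySem.List.sum_map_add_int, sum_single_hit k w L hL, ← ih hT',
        List.map_cons, List.sum_cons]

-- A's conditional-accumulate loop over the table, written as a sum
lemma foldA_eq_sum (P : List String) :
    sfDict.items.foldl (fun s cd => if cd.1 ∈ P then s + cd.2 else s) 0
      = (sfDict.items.map (fun cd => if cd.1 ∈ P then cd.2 else 0)).sum := by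
  have h : (fun (s : Int) (cd : String × Int) => if cd.1 ∈ P then s + cd.2 else s)
      = fun s cd => s + (if cd.1 ∈ P then cd.2 else 0) := by
    funext s cd; by_cases h : cd.1 ∈ P <;> simp [h]
  rw [h, PySem.List.foldl_add, zero_add]

-- both raw scores coincide
lemma raw_eq (P : List String) :
    sfDict.items.foldl (fun s cd => if cd.1 ∈ P then s + cd.2 else s) 0
      = ((PySem.Set.ofList P).map (fun c => sfDict.getD c 0)).sum := by
  have hdict : sfDict = PySem.Dict.mk sfDict.items := rfl
  have hkeys : (sfDict.items.map Prod.fst).Nodup := by decide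
  have hmem : (sfDict.items.map (fun cd => if cd.1 ∈ P then cd.2 else 0))
      = sfDict.items.map (fun cd => if cd.1 ∈ PySem.Set.ofList P then cd.2 else 0) := by
    refine List.map_congr_left (fun cd _ => ?_)
    simp [PySem.Set.mem_ofList]
  rw [foldA_eq_sum, hmem,
      exchange_sum sfDict.items hkeys (PySem.Set.ofList P) (PySem.Set.nodup_ofList P)]

-- the if/elif chain equals the threshold-table lookup on the clamped range
lemma label_eq (s : Int) (h0 : 0 ≤ s) (h1 : s ≤ 100) :
    (if s ≥ 81 then "CRITICAL"
     else if s ≥ 61 then "HIGH"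
     else if s ≥ 31 then "MEDIUM"
     else if s ≥ 1 then "LOW"
     else "NORMAL")
      = sfLabels.getD (sfThresholds.countP (fun t => t ≤ s)) "" := by
  interval_cases s <;> decide

-- ===== VERDICT (by name: the statement is the Claim_ definition above) =====
theorem score_from_factors_py_spec : Claim_equal_score_from_factors_py := by
  intro P _
  unfold Spec_score_from_factors_py score_from_factors_py score_from_factors_py_alt
  simp only [raw_eq P]
  set r : Int := ((PySem.Set.ofList P).map (fun c => sfDict.getD c 0)).sum with hr
  have h0 : 0 ≤ max 0 (min 100 r) := le_max_left 0 _
  have h1 : max 0 (min 100 r) ≤ 100 := by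
    rcases le_total 0 (min 100 r) with h | h
    · rw [max_eq_right h]; exact min_le_left 100 r
    · rw [max_eq_left h]; norm_num
  exact Prod.ext rfl (label_eq _ h0 h1)
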